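-- pv_equiv track=rewrite | github.com/HanqingXue/Leetcode | 56-Vaild-Number-Hard.py | isSci
-- ===== SOURCE A (Python) =====
-- def isSci(s):
--     INVALID = 0;
--     SPACE = 1;
--     DIGIT = 2;
--     E = 3;
--     OP = 4;
--     transitionTable = [[-1, 0, 1, -1, 5],
--                        [-1, -1, 1, 2, -1],
--                        [-1, -1, 3, -1, 4],
--                        [-1, 6, 3, -1, -1],
--                        [-1, -1, 3, -1, -1],
--                        [-1, -1, 1, -1, -1],
--                        [-1, 6, -1, -1, -1]]
--     state = 0;
--     i = 0;
--     while i < len(s):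
--         inputtype = INVALID
--         if s[i] == ' ':
--             inputtype = SPACE
--         elif s[i].isdigit():
--             inputtype = DIGIT
--         elif s[i] in 'Ee':
--             inputtype = E
--         elif s[i] in '+-':
--             inputtype = OP
--
--         state = transitionTable[state][inputtype]
--         if state == -1:
--             return False
--         else:
--             i += 1
--     return state == 3 or state == 6
-- ===== SOURCE B (Python) =====
-- def _signed_digits(t):
--     if t[:1] in ('+', '-'):
--         t = t[1:]
--     return t != '' and all(c.isdigit() for c in t)
--
--
-- def _split_first_e(core):
--     for i, c in enumerate(core):
--         if c == 'e' or c == 'E':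
--             return core[:i], core[i + 1:]
--     return None
--
--
-- def isSci(s):
--     core = s.strip(' ')
--     parts = _split_first_e(core)
--     if parts is None:
--         return False
--     mantissa, exponent = parts
--     return _signed_digits(mantissa) and _signed_digits(exponent)
-- ===== Notes on version B (the rewrite author's own statement) =====
-- stated objective: simpler
-- what changed: Replaces the 7-state DFA transition-table scan with a direct parse: strip surrounding spaces, split at the first exponent letter, and check that both halves are an optional sign followed by a non-empty digit run.
import Mathlib
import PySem

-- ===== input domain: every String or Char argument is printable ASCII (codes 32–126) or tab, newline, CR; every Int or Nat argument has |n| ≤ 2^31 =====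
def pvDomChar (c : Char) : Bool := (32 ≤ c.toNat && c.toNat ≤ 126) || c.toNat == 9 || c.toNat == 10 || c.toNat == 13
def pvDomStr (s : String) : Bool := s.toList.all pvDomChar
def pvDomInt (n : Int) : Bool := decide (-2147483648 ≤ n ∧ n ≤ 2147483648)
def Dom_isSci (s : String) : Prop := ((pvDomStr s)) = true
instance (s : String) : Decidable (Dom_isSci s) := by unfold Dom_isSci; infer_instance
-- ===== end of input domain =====

-- B replaces A's 7-state DFA table scan by strip-spaces / split-at-'e' / check two signed digit runs (objective: simpler).

-- ===== PORT A =====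
def isSciTable : List (List Int) :=
  [[-1, 0, 1, -1, 5],
   [-1, -1, 1, 2, -1],
   [-1, -1, 3, -1, 4],
   [-1, 6, 3, -1, -1],
   [-1, -1, 3, -1, -1],
   [-1, -1, 1, -1, -1],
   [-1, 6, -1, -1, -1]]

def isSciLoop : Nat → List Char → Bool
  | state, [] => state == 3 || state == 6
  | state, c :: rest =>
    -- inputtype: INVALID 0, SPACE 1, DIGIT 2, E 3, OP 4 (same branch order as A)
    let inputtype : Nat :=
      if c = ' ' then 1
      else if PySem.Chars.isdigit c then 2
      else if c = 'E' ∨ c = 'e' then 3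
      else if c = '+' ∨ c = '-' then 4
      else 0
    let st : Int := (isSciTable.getD state []).getD inputtype (-1)
    if st = -1 then false else isSciLoop st.toNat rest

def isSci (s : String) : Bool := isSciLoop 0 s.toList

-- ===== PORT B =====
-- port of t[1:] after the sign test in _signed_digits
def sdDropSign (t : List Char) : List Char :=
  match t with
  | [] => []
  | c :: r => if c = '+' ∨ c = '-' then r else c :: r

def signedDigits (t : List Char) : Bool :=
  let u := sdDropSign t
  !u.isEmpty && u.all PySem.Chars.isdigit

-- port of _split_first_e: split at the first 'e'/'E', none if there is none
def splitFirstE : List Char → Option (List Char × List Char)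
  | [] => none
  | c :: r =>
    if c = 'e' ∨ c = 'E' then some ([], r)
    else (splitFirstE r).map (fun p => (c :: p.1, p.2))

-- trailing-space strip; with the leading dropWhile below this is an exact port of s.strip(' ')
def rstripSp (l : List Char) : List Char := (l.reverse.dropWhile (· == ' ')).reverse

def isSci_alt (s : String) : Bool :=
  -- core = s.strip(' '), then split at the first 'e'/'E' and check both halves
  match splitFirstE (rstripSp (s.toList.dropWhile (· == ' '))) with
  | none => false
  | some (m, ex) => signedDigits m && signedDigits ex

-- ===== PRECONDITION & SPEC =====
def Spec_isSci (s : String) (out : Bool) : Prop := out = isSci_alt s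
instance (s : String) (out : Bool) : Decidable (Spec_isSci s out) := by unfold Spec_isSci; infer_instance

-- ===== CLAIM (what is proved, stated in full; the proofs are below) =====
def Claim_equal_isSci : Prop := ∀ (s : String), Dom_isSci s → Spec_isSci s (isSci s)

-- ===== LEMMAS AND PROOFS =====

-- characterizations of A's DFA states, stated as B-shaped predicates
def expOKc (cs : List Char) : Bool :=
  match sdDropSign cs with
  | [] => false
  | c :: r => PySem.Chars.isdigit c && (r.dropWhile PySem.Chars.isdigit).all (· == ' ')

def mantOKc (cs : List Char) : Bool :=
  match cs.dropWhile PySem.Chars.isdigit with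
  | [] => false
  | c :: r => (c = 'e' ∨ c = 'E' : Bool) && expOKc r

lemma isD_ne (c : Char) (h : PySem.Chars.isdigit c = true) :
    c ≠ ' ' ∧ c ≠ 'e' ∧ c ≠ 'E' ∧ c ≠ '+' ∧ c ≠ '-' := by
  refine ⟨?_, ?_, ?_, ?_, ?_⟩ <;> intro hc <;> subst hc <;> simp [PySem.Chars.isdigit] at h

lemma run6 (cs : List Char) : isSciLoop 6 cs = cs.all (· == ' ') := by
  induction cs with
  | nil => rfl
  | cons c r ih =>
    by_cases hsp : c = ' '
    · subst hsp; simp [isSciLoop, isSciTable, ih]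
    · by_cases hd : PySem.Chars.isdigit c
      · simp [isSciLoop, isSciTable, hsp, hd]
      · by_cases he : c = 'E' ∨ c = 'e'
        · simp [isSciLoop, isSciTable, hsp, hd, he]
        · by_cases hop : c = '+' ∨ c = '-'
          · simp [isSciLoop, isSciTable, hsp, hd, he, hop]
          · simp [isSciLoop, isSciTable, hsp, hd, he, hop]

lemma run3 (cs : List Char) :
    isSciLoop 3 cs = (cs.dropWhile PySem.Chars.isdigit).all (· == ' ') := by
  induction cs with
  | nil => rfl
  | cons c r ih =>
    by_cases hsp : c = ' '
    · subst hsp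
      simp [isSciLoop, isSciTable, run6, List.dropWhile, PySem.Chars.isdigit]
    · by_cases hd : PySem.Chars.isdigit c
      · simp [isSciLoop, isSciTable, hsp, hd, ih, List.dropWhile]
      · by_cases he : c = 'E' ∨ c = 'e'
        · rcases he with he | he <;> subst he <;>
            simp [isSciLoop, isSciTable, List.dropWhile, PySem.Chars.isdigit]
        · by_cases hop : c = '+' ∨ c = '-'
          · rcases hop with hop | hop <;> subst hop <;>
              simp [isSciLoop, isSciTable, List.dropWhile, PySem.Chars.isdigit]
          · simp [isSciLoop, isSciTable, hsp, hd, he, hop, List.dropWhile]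

lemma run4 (cs : List Char) :
    isSciLoop 4 cs = (match cs with
      | [] => false
      | c :: r => PySem.Chars.isdigit c && (r.dropWhile PySem.Chars.isdigit).all (· == ' ')) := by
  cases cs with
  | nil => rfl
  | cons c r =>
    by_cases hsp : c = ' '
    · subst hsp; simp [isSciLoop, isSciTable, PySem.Chars.isdigit]
    · by_cases hd : PySem.Chars.isdigit c
      · simp [isSciLoop, isSciTable, hsp, hd, run3]
      · by_cases he : c = 'E' ∨ c = 'e'
        · rcases he with he | he <;> subst he <;> simp [isSciLoop, isSciTable, PySem.Chars.isdigit]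
        · by_cases hop : c = '+' ∨ c = '-'
          · rcases hop with hop | hop <;> subst hop <;> simp [isSciLoop, isSciTable, PySem.Chars.isdigit]
          · simp [isSciLoop, isSciTable, hsp, hd, he, hop]


lemma run2 (cs : List Char) : isSciLoop 2 cs = expOKc cs := by
  cases cs with
  | nil => rfl
  | cons c r =>
    by_cases hsp : c = ' '
    · subst hsp; simp [isSciLoop, isSciTable, expOKc, sdDropSign, PySem.Chars.isdigit]
    · by_cases hd : PySem.Chars.isdigit c
      · obtain ⟨h1, h2, h3, h4, h5⟩ := isD_ne c hd
        simp [isSciLoop, isSciTable, hsp, hd, run3, expOKc, sdDropSign, h4, h5]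
      · by_cases he : c = 'E' ∨ c = 'e'
        · rcases he with he | he <;> subst he <;>
            simp [isSciLoop, isSciTable, expOKc, sdDropSign, PySem.Chars.isdigit]
        · by_cases hop : c = '+' ∨ c = '-'
          · simp [isSciLoop, isSciTable, hsp, hd, he, hop, run4, expOKc, sdDropSign]
          · simp [isSciLoop, isSciTable, hsp, hd, he, hop, expOKc, sdDropSign]


lemma run1 (cs : List Char) : isSciLoop 1 cs = mantOKc cs := by
  induction cs with
  | nil => rfl
  | cons c r ih =>
    by_cases hsp : c = ' '
    · subst hsp
      simp [isSciLoop, isSciTable, mantOKc, List.dropWhile, PySem.Chars.isdigit]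
    · by_cases hd : PySem.Chars.isdigit c
      · simp [isSciLoop, isSciTable, hsp, hd, ih, mantOKc, List.dropWhile]
      · by_cases he : c = 'E' ∨ c = 'e'
        · rcases he with he | he <;> subst he <;>
            simp [isSciLoop, isSciTable, run2, mantOKc, List.dropWhile, PySem.Chars.isdigit]
        · by_cases hop : c = '+' ∨ c = '-'
          · rcases hop with hop | hop <;> subst hop <;>
              simp [isSciLoop, isSciTable, mantOKc, List.dropWhile, PySem.Chars.isdigit]
          · simp [isSciLoop, isSciTable, hsp, hd, he, hop, mantOKc, List.dropWhile]
            rintro (h | h)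
            · exact absurd (Or.inr h) he
            · exact absurd (Or.inl h) he


lemma run5 (cs : List Char) :
    isSciLoop 5 cs = (match cs with
      | [] => false
      | c :: r => PySem.Chars.isdigit c && mantOKc r) := by
  cases cs with
  | nil => rfl
  | cons c r =>
    by_cases hsp : c = ' '
    · subst hsp; simp [isSciLoop, isSciTable, PySem.Chars.isdigit]
    · by_cases hd : PySem.Chars.isdigit c
      · simp [isSciLoop, isSciTable, hsp, hd, run1]
      · by_cases he : c = 'E' ∨ c = 'e'
        · rcases he with he | he <;> subst he <;> simp [isSciLoop, isSciTable, PySem.Chars.isdigit]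
        · by_cases hop : c = '+' ∨ c = '-'
          · rcases hop with hop | hop <;> subst hop <;> simp [isSciLoop, isSciTable, PySem.Chars.isdigit]
          · simp [isSciLoop, isSciTable, hsp, hd, he, hop]


lemma run0 (cs : List Char) :
    isSciLoop 0 cs = (match sdDropSign (cs.dropWhile (· == ' ')) with
      | [] => false
      | c :: r => PySem.Chars.isdigit c && mantOKc r) := by
  induction cs with
  | nil => rfl
  | cons c r ih =>
    by_cases hsp : c = ' '
    · subst hsp; simp [isSciLoop, isSciTable, ih, List.dropWhile]
    · by_cases hd : PySem.Chars.isdigit c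
      · obtain ⟨h1, h2, h3, h4, h5⟩ := isD_ne c hd
        simp [isSciLoop, isSciTable, hsp, hd, run1, sdDropSign, h4, h5]
      · by_cases he : c = 'E' ∨ c = 'e'
        · rcases he with he | he <;> subst he <;>
            simp [isSciLoop, isSciTable, List.dropWhile, sdDropSign, PySem.Chars.isdigit]
        · by_cases hop : c = '+' ∨ c = '-'
          · simp [isSciLoop, isSciTable, hsp, hd, he, hop, run5, sdDropSign]
          · simp [isSciLoop, isSciTable, hsp, hd, he, hop, sdDropSign]


-- rstripSp structure lemmas
lemma rstrip_nil_iff (t : List Char) : rstripSp t = [] ↔ t.all (· == ' ') = true := by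
  unfold rstripSp
  simp [List.dropWhile_eq_nil_iff, List.all_eq_true]


lemma rstrip_cons (c : Char) (r : List Char) :
    rstripSp (c :: r) =
      if rstripSp r = [] then (if c = ' ' then [] else [c]) else c :: rstripSp r := by
  unfold rstripSp
  rw [show (c :: r).reverse = r.reverse ++ [c] from by simp, List.dropWhile_append]
  by_cases h : (r.reverse.dropWhile (· == ' ')).isEmpty
  · have h0 : (r.reverse.dropWhile (· == ' ')).reverse = [] := by
      rw [List.reverse_eq_nil_iff]; exact List.isEmpty_iff.mp h
    rw [if_pos h, if_pos h0]
    by_cases hc : c = ' '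
    · subst hc; simp
    · simp [hc]
  · have h0 : ¬(r.reverse.dropWhile (· == ' ')).reverse = [] := by
      intro hx; exact h (List.isEmpty_iff.mpr (List.reverse_eq_nil_iff.mp hx))
    rw [if_neg h, if_neg h0]
    simp


lemma rstrip_append (u : List Char) (a : Char) :
    rstripSp (u ++ [a]) = if a = ' ' then rstripSp u else u ++ [a] := by
  unfold rstripSp
  rw [show (u ++ [a]).reverse = a :: u.reverse from by simp, List.dropWhile_cons]
  by_cases ha : a = ' '
  · simp [ha]
  · simp [ha]


-- digits-then-spaces ⟺ strip-trailing-spaces-all-digits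
lemma digits_spaces (r : List Char) :
    (r.dropWhile PySem.Chars.isdigit).all (· == ' ') = (rstripSp r).all PySem.Chars.isdigit := by
  induction r with
  | nil => rfl
  | cons c t ih =>
    rw [List.dropWhile_cons, rstrip_cons]
    by_cases hd : PySem.Chars.isdigit c
    · have hne : ¬c = ' ' := (isD_ne c hd).1
      by_cases h0 : rstripSp t = []
      · have : (List.dropWhile PySem.Chars.isdigit t).all (· == ' ') = true := by
          rw [ih, h0]; rfl
        simp [hd, this, h0, hne]
      · simp [hd, ih, h0]
    · by_cases hc : c = ' '
      · subst hc
        by_cases h0 : rstripSp t = []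
        · have := (rstrip_nil_iff t).mp h0
          simp [PySem.Chars.isdigit, h0, this]
        · have hnall : t.all (· == ' ') ≠ true := fun h => h0 ((rstrip_nil_iff t).mpr h)
          simp [PySem.Chars.isdigit, h0, hnall]
      · by_cases h0 : rstripSp t = []
        · simp [hd, hc, h0]
        · simp [hd, hc, h0]


lemma core_digits (w : List Char) :
    (match w with
      | [] => false
      | c :: r => PySem.Chars.isdigit c && (r.dropWhile PySem.Chars.isdigit).all (· == ' ')) =
    (!(rstripSp w).isEmpty && (rstripSp w).all PySem.Chars.isdigit) := by
  cases w with
  | nil => rfl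
  | cons c r =>
    rw [show (match c :: r with
        | [] => false
        | c :: r => PySem.Chars.isdigit c && (r.dropWhile PySem.Chars.isdigit).all (· == ' ')) =
        (PySem.Chars.isdigit c && (r.dropWhile PySem.Chars.isdigit).all (· == ' ')) from rfl,
      digits_spaces, rstrip_cons]
    by_cases hd : PySem.Chars.isdigit c
    · have hne : ¬c = ' ' := (isD_ne c hd).1
      by_cases h0 : rstripSp r = []
      · simp [hd, h0, hne]
      · simp [hd, h0]
    · by_cases hc : c = ' '
      · by_cases h0 : rstripSp r = []
        · simp [hc, h0, PySem.Chars.isdigit]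
        · simp [hc, h0, PySem.Chars.isdigit]
      · by_cases h0 : rstripSp r = []
        · simp [hc, h0, PySem.Chars.isdigit]
        · simp [h0, PySem.Chars.isdigit]


lemma expOK_signed (ex : List Char) : expOKc ex = signedDigits (rstripSp ex) := by
  cases ex with
  | nil => rfl
  | cons c r =>
    unfold expOKc
    by_cases hop : c = '+' ∨ c = '-'
    · have hne : ¬c = ' ' := by rcases hop with h | h <;> subst h <;> decide
      rw [show sdDropSign (c :: r) = r from by simp [sdDropSign, hop], core_digits r, rstrip_cons]
      by_cases h0 : rstripSp r = []
      · simp [h0, hne, signedDigits, sdDropSign, hop]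
      · simp [h0, signedDigits, sdDropSign, hop]
    · rw [show sdDropSign (c :: r) = c :: r from by simp [sdDropSign, hop],
        core_digits (c :: r), rstrip_cons]
      by_cases h0 : rstripSp r = []
      · by_cases hc : c = ' '
        · simp [h0, hc, signedDigits, sdDropSign]
        · simp [h0, hc, signedDigits, sdDropSign, hop]
      · simp [h0, signedDigits, sdDropSign, hop]


-- splitFirstE lemmas
lemma splitE_append (u : List Char) (a : Char) :
    splitFirstE (u ++ [a]) =
      (match splitFirstE u with
       | some p => some (p.1, p.2 ++ [a])
       | none => if a = 'e' ∨ a = 'E' then some (u, []) else none) := by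
  induction u with
  | nil =>
    by_cases ha : a = 'e' ∨ a = 'E'
    · simp [splitFirstE, ha]
    · simp [splitFirstE, ha]
  | cons c u ih =>
    by_cases hc : c = 'e' ∨ c = 'E'
    · simp [splitFirstE, hc]
    · simp only [List.cons_append, splitFirstE, if_neg hc, ih]
      cases splitFirstE u with
      | none =>
        by_cases ha : a = 'e' ∨ a = 'E'
        · simp [ha]
        · simp [ha]
      | some p => simp


lemma splitE_rstrip (u : List Char) :
    splitFirstE (rstripSp u) = (splitFirstE u).map (fun p => (p.1, rstripSp p.2)) := by
  induction u using List.reverseRecOn with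
  | nil => rfl
  | append_singleton u a ih =>
    rw [rstrip_append]
    by_cases ha : a = ' '
    · rw [if_pos ha, ih, splitE_append]
      cases splitFirstE u with
      | none =>
        have : ¬(a = 'e' ∨ a = 'E') := by subst ha; decide
        simp [this]
      | some p => simp [rstrip_append, ha]
    · rw [if_neg ha, splitE_append]
      cases splitFirstE u with
      | none =>
        by_cases he : a = 'e' ∨ a = 'E'
        · simp [he, rstripSp]
        · simp [he]
      | some p => simp [rstrip_append, ha]


lemma mant_splitE (u : List Char) :
    mantOKc u = (match splitFirstE u with
      | some p => p.1.all PySem.Chars.isdigit && expOKc p.2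
      | none => false) := by
  induction u with
  | nil => rfl
  | cons c r ih =>
    unfold mantOKc
    by_cases he : c = 'e' ∨ c = 'E'
    · have hd : ¬PySem.Chars.isdigit c = true := by
        rcases he with h | h <;> subst h <;> decide
      rw [List.dropWhile_cons, if_neg hd]
      simp [splitFirstE, he]
    · by_cases hd : PySem.Chars.isdigit c
      · rw [List.dropWhile_cons, if_pos hd]
        have : splitFirstE (c :: r) = (splitFirstE r).map (fun p => (c :: p.1, p.2)) := by
          simp [splitFirstE, he]
        rw [this, ← mantOKc, ih]
        cases splitFirstE r with
        | none => rfl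
        | some p => simp [hd]
      · rw [List.dropWhile_cons, if_neg hd]
        have : splitFirstE (c :: r) = (splitFirstE r).map (fun p => (c :: p.1, p.2)) := by
          simp [splitFirstE, he]
        rw [this]
        cases splitFirstE r with
        | none => simp [he]
        | some p => simp [he, hd]


lemma mant2_splitE (u : List Char) :
    (match u with
      | [] => false
      | c :: r => PySem.Chars.isdigit c && mantOKc r) =
    (match splitFirstE u with
      | some p => (!p.1.isEmpty && p.1.all PySem.Chars.isdigit) && expOKc p.2
      | none => false) := by
  cases u with
  | nil => rfl
  | cons c r =>
    by_cases he : c = 'e' ∨ c = 'E'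
    · have hd : ¬PySem.Chars.isdigit c = true := by
        rcases he with h | h <;> subst h <;> decide
      simp [splitFirstE, he, hd]
    · have hsplit : splitFirstE (c :: r) = (splitFirstE r).map (fun p => (c :: p.1, p.2)) := by
        simp [splitFirstE, he]
      rw [hsplit]
      by_cases hd : PySem.Chars.isdigit c
      · rw [show (match c :: r with
            | [] => false
            | c :: r => PySem.Chars.isdigit c && mantOKc r) = (PySem.Chars.isdigit c && mantOKc r) from rfl,
          mant_splitE]
        cases splitFirstE r with
        | none => simp
        | some p => simp [hd]
      · cases splitFirstE r with
        | none => simp [hd]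
        | some p => simp [hd]


lemma bridge (t : List Char) :
    (match sdDropSign t with
      | [] => false
      | c :: r => PySem.Chars.isdigit c && mantOKc r) =
    (match splitFirstE t with
      | some p => signedDigits p.1 && expOKc p.2
      | none => false) := by
  cases t with
  | nil => rfl
  | cons c r =>
    by_cases hop : c = '+' ∨ c = '-'
    · have hne : ¬(c = 'e' ∨ c = 'E') := by
        rcases hop with h | h <;> subst h <;> decide
      rw [show sdDropSign (c :: r) = r from by simp [sdDropSign, hop],
        show splitFirstE (c :: r) = (splitFirstE r).map (fun p => (c :: p.1, p.2)) from by
          simp [splitFirstE, hne],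
        mant2_splitE]
      cases splitFirstE r with
      | none => rfl
      | some p => simp [signedDigits, sdDropSign, hop]
    · by_cases he : c = 'e' ∨ c = 'E'
      · have hd : ¬PySem.Chars.isdigit c = true := by
          rcases he with h | h <;> subst h <;> decide
        rw [show sdDropSign (c :: r) = c :: r from by simp [sdDropSign, hop]]
        simp [splitFirstE, he, hd, signedDigits, sdDropSign]
      · rw [show sdDropSign (c :: r) = c :: r from by simp [sdDropSign, hop],
          show splitFirstE (c :: r) = (splitFirstE r).map (fun p => (c :: p.1, p.2)) from by
            simp [splitFirstE, he]]
        by_cases hd : PySem.Chars.isdigit c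
        · rw [show (match c :: r with
              | [] => false
              | c :: r => PySem.Chars.isdigit c && mantOKc r) = (PySem.Chars.isdigit c && mantOKc r) from rfl,
            mant_splitE]
          cases splitFirstE r with
          | none => simp
          | some p => simp [hd, signedDigits, sdDropSign, hop]
        · rw [show (match c :: r with
              | [] => false
              | c :: r => PySem.Chars.isdigit c && mantOKc r) = (PySem.Chars.isdigit c && mantOKc r) from rfl]
          cases splitFirstE r with
          | none => simp [hd]
          | some p => simp [hd, signedDigits, sdDropSign, hop]


lemma main_eq (s : String) : isSci s = isSci_alt s := by
  unfold isSci isSci_alt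
  rw [run0, bridge, splitE_rstrip]
  cases h : splitFirstE (s.toList.dropWhile (· == ' ')) with
  | none => rfl
  | some p => cases p with | mk m ex => simp [expOK_signed]


-- ===== VERDICT (by name: the statement is the Claim_ definition above) =====
theorem isSci_spec : Claim_equal_isSci := by
  intro s _
  unfold Spec_isSci
  exact main_eq s
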